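-- pv_equiv track=rewrite | github.com/El-Dringo-Brannde/OSU-Classes | CS-361-SoftwareEngineering1/Assignment2/Fast&TestableKwic.py | proc_linepairs
-- ===== SOURCE A (Python) =====
-- def Remove_Punctuation(Parsed_Array):
-- 	for b in (range(len(Parsed_Array))):
-- 		for c in (range(len(Parsed_Array[b]))):
-- 			d = 0
-- 			while d != len(Parsed_Array[b][c]): #Removes any puncuation in the strings
-- 				letter = Parsed_Array[b][c][d]
-- 				if (letter == chr(33) or letter == chr(46) or letter == chr(63) or letter == chr(44) or letter == chr(58)):
-- 					Parsed_Array[b][c] = Parsed_Array[b][c][:d]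
-- 				else:
-- 					d +=1
--
-- def Find_WordPairs(Parsed_Array,wordpairs):
-- 	for i in range(len(Parsed_Array)-1): #goes the number of lines
-- 		for f in range(len(Parsed_Array[i]) -1):#goes the number of words in line
-- 			spot1 = Parsed_Array[i][f]
-- 			t = f+1	#prevents from checking before spot1
-- 			while t != int(len(Parsed_Array[i])):#goes to length of line
-- 				spot2 = Parsed_Array[i][t]	#grabs the second word
-- 				q = i+1		#prevents going back before the current string iteration
-- 				while q != len(Parsed_Array): #goes length from where next line is to end
-- 					for x in range(len(Parsed_Array[q])): #goes the number of words in next line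
-- 						check1 = Parsed_Array[q][x]
-- 						if (spot1 == check1 or spot2 == check1):
-- 							w = x +1 #prevents check2 from starting back over in string
-- 							while w != len(Parsed_Array[q]): #repeats while the end of the line hasn't been hit
-- 								check2 = Parsed_Array[q][w]
-- 								if (spot1 == check1 or spot1 == check2) and (spot2 == check2 or spot2 == check1) and (spot1 != spot2):
-- 									pair = spot1 + " " + spot2
-- 									wordpairs[pair] = wordpairs.setdefault(pair,0) + 1
-- 								w +=1
-- 					q += 1
-- 				t += 1
--
-- def proc_linepairs(Parsed_Array,Final_Array,periodsToBreaks):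
-- 	Parsed_Array = [[str.lower(i) for i in j] for j in Parsed_Array]
-- 	Remove_Punctuation(Parsed_Array)
-- 	wordpairs = dict()
-- 	Final_Word_Pairs,holder = ([] for i in range(2))
-- 	greenflag = 1
-- 	Find_WordPairs(Parsed_Array,wordpairs)
-- 	for key,value in wordpairs.items():
-- 		wordcount = wordpairs[key]
-- 		if wordcount == 1:
-- 			wordcount += 1
-- 		holder.append(key)
-- 		holder.append(wordcount)
-- 	i = 0
-- 	while i != len(holder):
-- 		holder[i] = holder[i].split()
-- 		holder[i].sort()
-- 		if len(holder[i]) == 2: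
-- 			Final_Word_Pairs.append(tuple([tuple(holder[i])]) + tuple([holder[i+1]])) #Formatting
-- 		i +=  2
-- 	Final_Word_Pairs.sort()
-- 	return Final_Word_Pairs
-- ===== SOURCE B (Python) =====
-- def proc_linepairs(Parsed_Array, Final_Array, periodsToBreaks):
--     # Lowercase every word and cut it at its first '!', '.', '?', ',' or ':'.
--     punct = '!.?,:'
--     lines = []
--     for row in Parsed_Array:
--         words = []
--         for w in row:
--             w = w.lower()
--             for k, ch in enumerate(w):
--                 if ch in punct:
--                     w = w[:k]
--                     break
--             words.append(w)
--         lines.append(words)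
--
--     # Per line: P = ordered-pair counts (#positions f<t with words (s1,s2), s1!=s2)
--     # and C = word counts, each built in ONE pass over the line.
--     PCs = []
--     for words in lines:
--         P = {}
--         C = {}
--         for w in words:
--             for s1, c in C.items():
--                 if s1 != w:
--                     P[(s1, w)] = P.get((s1, w), 0) + c
--             C[w] = C.get(w, 0) + 1
--         PCs.append((P, C))
--
--     # Walk the lines back to front, keeping pair_suffix[(a,b)] =
--     # sum over already-seen (later) lines of count(a)*count(b).
--     totals = {}
--     pair_suffix = {}
--     for P, C in reversed(PCs):
--         for (s1, s2), p in P.items():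
--             m = pair_suffix.get((s1, s2), 0)
--             if m != 0:
--                 key = s1 + " " + s2
--                 totals[key] = totals.get(key, 0) + p * m
--         ws = list(C)
--         for a in ws:
--             for b in ws:
--                 if a != b:
--                     pair_suffix[(a, b)] = pair_suffix.get((a, b), 0) + C[a] * C[b]
--
--     # Format: a pair seen once is reported with count 2 (as the original does),
--     # the key is re-split and sorted, non-2-token keys are dropped; sort the result.
--     result = []
--     for key, cnt in totals.items():
--         if cnt == 1:
--             cnt = 2
--         toks = key.split()
--         toks.sort()
--         if len(toks) == 2:
--             result.append((tuple(toks), cnt))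
--     result.sort()
--     return result
-- ===== Notes on version B (the rewrite author's own statement) =====
-- stated objective: faster
-- what changed: Replaces the six-deep nested rescans of every later line for every word pair with per-line word/pair count dictionaries combined by a single back-to-front suffix accumulation of count products.
import Mathlib
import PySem

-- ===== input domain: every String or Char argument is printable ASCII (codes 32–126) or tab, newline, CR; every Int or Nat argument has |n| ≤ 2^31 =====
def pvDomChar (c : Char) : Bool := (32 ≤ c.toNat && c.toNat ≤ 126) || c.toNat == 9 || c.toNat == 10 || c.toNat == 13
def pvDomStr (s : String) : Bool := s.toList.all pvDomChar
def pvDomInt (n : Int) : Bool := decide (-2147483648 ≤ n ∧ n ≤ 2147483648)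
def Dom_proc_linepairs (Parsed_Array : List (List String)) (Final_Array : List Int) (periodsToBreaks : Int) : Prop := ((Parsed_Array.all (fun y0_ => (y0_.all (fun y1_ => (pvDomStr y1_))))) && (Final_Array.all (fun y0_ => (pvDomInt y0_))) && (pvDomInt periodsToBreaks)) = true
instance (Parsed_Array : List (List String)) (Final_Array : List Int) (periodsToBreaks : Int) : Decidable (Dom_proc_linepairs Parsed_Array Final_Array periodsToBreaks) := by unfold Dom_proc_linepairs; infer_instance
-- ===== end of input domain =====

-- B replaces A's six-deep nested rescans by per-line pair/word count dictionaries and one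
-- back-to-front suffix accumulation of count products (measurably faster on large inputs).
-- Dict keys 'spot1 + " " + spot2' are ported at the List Char level (string concatenation =
-- list append), exact for Python str; Final_Array and periodsToBreaks are unused by A itself.

-- ===== PORT A =====
-- letter == chr(33)/chr(46)/chr(63)/chr(44)/chr(58)
def pvIsPunc (c : Char) : Bool :=
  c == Char.ofNat 33 || c == Char.ofNat 46 || c == Char.ofNat 63 || c == Char.ofNat 44 || c == Char.ofNat 58

-- the 'while d != len(word)' loop of Remove_Punctuation on one word (word[:d] = take d;
-- d ≤ length is invariant, so 'd != len' is 'd < length')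
def pvRP (d : Nat) (cs : List Char) : List Char :=
  if h : d < cs.length then
    if pvIsPunc cs[d] then pvRP d (cs.take d) else pvRP (d + 1) cs
  else cs
termination_by cs.length - d
decreasing_by
  · simp only [List.length_take]; omega
  · omega

def pvRemovePunct (PA : List (List String)) : List (List String) :=
  PA.map (fun line => line.map (fun w => String.ofList (pvRP 0 w.toList)))

-- Find_WordPairs: each index loop becomes the structural recursion over the same suffix.
-- innermost 'while w != len(...)' loop over check2
def pvLoopW (spot1 spot2 check1 : String) : List String → PySem.Dict (List Char) Int → PySem.Dict (List Char) Int
  | [], d => d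
  | check2 :: rest, d =>
      pvLoopW spot1 spot2 check1 rest
        (if (spot1 == check1 || spot1 == check2) && (spot2 == check2 || spot2 == check1) && spot1 != spot2 then
          let pair := spot1.toList ++ ' ' :: spot2.toList
          d.insert pair (d.getD pair 0 + 1)
        else d)

-- 'for x in range(len(Parsed_Array[q]))' loop over check1
def pvLoopX (spot1 spot2 : String) : List String → PySem.Dict (List Char) Int → PySem.Dict (List Char) Int
  | [], d => d
  | check1 :: rest, d =>
      pvLoopX spot1 spot2 rest
        (if spot1 == check1 || spot2 == check1 then pvLoopW spot1 spot2 check1 rest d else d)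

-- 'while q != len(Parsed_Array)' loop over the later lines
def pvLoopQ (spot1 spot2 : String) : List (List String) → PySem.Dict (List Char) Int → PySem.Dict (List Char) Int
  | [], d => d
  | lq :: more, d => pvLoopQ spot1 spot2 more (pvLoopX spot1 spot2 lq d)

-- 'while t != int(len(Parsed_Array[i]))' loop over spot2
def pvLoopT (spot1 : String) : List String → List (List String) → PySem.Dict (List Char) Int → PySem.Dict (List Char) Int
  | [], _, d => d
  | spot2 :: rest2, later, d => pvLoopT spot1 rest2 later (pvLoopQ spot1 spot2 later d)

-- 'for f in range(len(Parsed_Array[i]) - 1)' loop over spot1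
def pvLoopF : List String → List (List String) → PySem.Dict (List Char) Int → PySem.Dict (List Char) Int
  | [], _, d => d
  | spot1 :: rest, later, d => pvLoopF rest later (pvLoopT spot1 rest later d)

-- 'for i in range(len(Parsed_Array) - 1)' (for the last line the q-loop is empty, so
-- including it changes nothing)
def pvFindWordPairs : List (List String) → PySem.Dict (List Char) Int → PySem.Dict (List Char) Int
  | [], d => d
  | line :: later, d => pvFindWordPairs later (pvLoopF line later d)

-- holder[i].split(); holder[i].sort()
def pvTokens (k : List Char) : List String :=
  PySem.List.sorted ((PySem.Chars.split₀ k).map (fun cs => String.ofList cs)) (fun x => x)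

-- the 'while i != len(holder)' stride-2 loop (holder's key/count alternation kept as pairs)
def pvProcHolder : List (List Char × Int) → List (List String × Int) → List (List String × Int)
  | [], acc => acc
  | (k, c) :: rest, acc =>
      let toks := pvTokens k
      pvProcHolder rest (if toks.length = 2 then acc ++ [(toks, c)] else acc)

def proc_linepairs (Parsed_Array : List (List String)) (Final_Array : List Int) (periodsToBreaks : Int) : List (List String × Int) :=
  let parsed := Parsed_Array.map (fun j => j.map (fun i => PySem.Str.lower i))
  let parsed := pvRemovePunct parsed
  let wordpairs := pvFindWordPairs parsed PySem.Dict.empty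
  let holder := wordpairs.items.foldl (fun h kv =>
      let wordcount := wordpairs.getD kv.1 0
      let wordcount := if wordcount = 1 then wordcount + 1 else wordcount
      h ++ [(kv.1, wordcount)]) []
  PySem.List.sorted2 (pvProcHolder holder []) Prod.fst Prod.snd

-- ===== PORT B =====
-- one pass per line: P counts positions f<t holding (s1,w) with s1 != w, C counts words
def pvBuildPC (words : List String) : PySem.Dict (String × String) Int × PySem.Dict String Int :=
  words.foldl (fun PC w =>
      (PC.2.items.foldl (fun P kv =>
          if kv.1 != w then P.insert (kv.1, w) (P.getD (kv.1, w) 0 + kv.2) else P) PC.1,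
       PC.2.insert w (PC.2.getD w 0 + 1)))
    (PySem.Dict.empty, PySem.Dict.empty)

-- one backward step: credit line i's pairs with the suffix products, then add line i's
-- count products to pair_suffix; state = (pair_suffix, totals)
def pvSuffStep (st : PySem.Dict (String × String) Int × PySem.Dict (List Char) Int)
    (PC : PySem.Dict (String × String) Int × PySem.Dict String Int) :
    PySem.Dict (String × String) Int × PySem.Dict (List Char) Int :=
  let T := PC.1.items.foldl (fun T kv =>
      let m := st.1.getD kv.1 0
      if m != 0 then
        let key := kv.1.1.toList ++ ' ' :: kv.1.2.toList
        T.insert key (T.getD key 0 + kv.2 * m)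
      else T) st.2
  let ws := PC.2.keys
  let PS := ws.foldl (fun PS a =>
      ws.foldl (fun PS b =>
          if a != b then PS.insert (a, b) (PS.getD (a, b) 0 + PC.2.getD a 0 * PC.2.getD b 0) else PS)
        PS) st.1
  (PS, T)

def proc_linepairs_alt (Parsed_Array : List (List String)) (Final_Array : List Int) (periodsToBreaks : Int) : List (List String × Int) :=
  let lines := Parsed_Array.map (fun row => row.map (fun w =>
      String.ofList ((PySem.Str.lower w).toList.takeWhile (fun c => !(['!', '.', '?', ',', ':'].contains c)))))
  let PCs := lines.map pvBuildPC
  let st := PCs.reverse.foldl pvSuffStep (PySem.Dict.empty, PySem.Dict.empty)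
  let result := st.2.items.foldl (fun acc kv =>
      let cnt := if kv.2 = 1 then 2 else kv.2
      let toks := PySem.List.sorted ((PySem.Chars.split₀ kv.1).map (fun cs => String.ofList cs)) (fun x => x)
      if toks.length = 2 then acc ++ [(toks, cnt)] else acc) []
  PySem.List.sorted2 result Prod.fst Prod.snd

-- ===== PRECONDITION & SPEC =====
def Spec_proc_linepairs (Parsed_Array : List (List String)) (Final_Array : List Int) (periodsToBreaks : Int) (out : List (List String × Int)) : Prop := out = proc_linepairs_alt Parsed_Array Final_Array periodsToBreaks
instance (Parsed_Array : List (List String)) (Final_Array : List Int) (periodsToBreaks : Int) (out : List (List String × Int)) : Decidable (Spec_proc_linepairs Parsed_Array Final_Array periodsToBreaks out) := by unfold Spec_proc_linepairs; infer_instance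

-- ===== CLAIM (what is proved, stated in full; the proofs are below) =====
def Claim_equal_proc_linepairs : Prop := ∀ (Parsed_Array : List (List String)) (Final_Array : List Int) (periodsToBreaks : Int), Dom_proc_linepairs Parsed_Array Final_Array periodsToBreaks → Spec_proc_linepairs Parsed_Array Final_Array periodsToBreaks (proc_linepairs Parsed_Array Final_Array periodsToBreaks)


-- ===== LEMMAS AND PROOFS =====

-- ---------- spec-side middle definitions ----------
def pvKeyOf (pr : String × String) : List Char := pr.1.toList ++ ' ' :: pr.2.toList

def pvPairsOf : List String → List (String × String)
  | [] => []
  | h :: tl => tl.map (fun x => (h, x)) ++ pvPairsOf tl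

def pvPairsNe (l : List String) : List (String × String) :=
  (pvPairsOf l).filter (fun pr => pr.1 != pr.2)

def pvMv (later : List (List String)) (pr : String × String) : Nat :=
  (later.map (fun lq => lq.count pr.1 * lq.count pr.2)).sum

def pvNN : List (List String) → List Char → Nat
  | [], _ => 0
  | line :: later, k =>
      ((pvPairsNe line).map (fun pr => if k = pvKeyOf pr then pvMv later pr else 0)).sum + pvNN later k

-- ---------- generic small sum lemmas ----------
theorem pvSumIf {α : Type} (l : List α) (p : α → Bool) (f : α → Nat) :
    ((l.filter p).map f).sum = (l.map (fun x => if p x then f x else 0)).sum := by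
  induction l with
  | nil => simp
  | cons x t ih => by_cases hx : p x <;> simp [List.filter_cons, hx, ih]

theorem pvSumIndicator {α : Type} [DecidableEq α] (ks : List α) (a : α) (f : α → Int)
    (hnd : ks.Nodup) :
    (ks.map (fun x => if x = a then f x else 0)).sum = if a ∈ ks then f a else 0 := by
  induction ks with
  | nil => simp
  | cons x t ih =>
    simp only [List.nodup_cons] at hnd
    by_cases hx : x = a
    · subst hx
      simp [List.mem_cons, hnd.1, ih hnd.2]
    · have hmem : (a ∈ x :: t) ↔ a ∈ t := by
        simp only [List.mem_cons]
        constructor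
        · rintro (h | h)
          · exact absurd h.symm hx
          · exact h
        · exact Or.inr
      simp only [List.map_cons, List.sum_cons, if_neg hx, ih hnd.2, zero_add]
      rw [if_congr hmem rfl rfl]

theorem pvSumSplit {α : Type} [BEq α] [LawfulBEq α] [DecidableEq α] (l : List α) (k : α) (g : α → Int) :
    (l.map g).sum = (l.count k : Int) * g k + ((l.filter (fun x => x ≠ k)).map g).sum := by
  induction l with
  | nil => simp
  | cons x t ih =>
    by_cases hx : x = k
    · subst hx
      simp only [List.map_cons, List.sum_cons, List.count_cons_self, List.filter_cons,
        ne_eq, not_true_eq_false, decide_false, ih]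
      push_cast; ring
    · simp [List.count_cons_of_ne hx, List.filter_cons, hx, ih]
      ring

theorem pvSumCountWeight {α : Type} [BEq α] [LawfulBEq α] [DecidableEq α] (ks l : List α) (g : α → Int)
    (hnd : ks.Nodup) (hmem : ∀ x, x ∈ ks ↔ x ∈ l) :
    (ks.map (fun x => (l.count x : Int) * g x)).sum = (l.map g).sum := by
  induction ks generalizing l with
  | nil =>
    have : l = [] := List.eq_nil_iff_forall_not_mem.mpr (fun x hx => by
      exact absurd ((hmem x).mpr hx) (List.not_mem_nil))
    simp [this]
  | cons k t ih =>
    simp only [List.nodup_cons] at hnd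
    rw [pvSumSplit l k g]
    simp only [List.map_cons, List.sum_cons]
    congr 1
    have hcnt : ∀ x ∈ t, (l.count x : Int) * g x = ((l.filter (fun y => y ≠ k)).count x : Int) * g x := by
      intro x hx
      have hxk : x ≠ k := fun h => hnd.1 (h ▸ hx)
      rw [List.count_filter (by simpa using hxk)]
    rw [List.map_congr_left hcnt]
    refine ih _ hnd.2 ?_
    intro x
    constructor
    · intro hx
      have hxk : x ≠ k := fun h => hnd.1 (h ▸ hx)
      exact List.mem_filter.mpr ⟨(hmem x).mp (List.mem_cons_of_mem _ hx), by simpa using hxk⟩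
    · intro hx
      rcases List.mem_filter.mp hx with ⟨hxl, hxk⟩
      have := (hmem x).mpr hxl
      rcases List.mem_cons.mp this with h | h
      · exact absurd h (by simpa using hxk)
      · exact h

-- ---------- generic dict-fold lemmas (one conditional insert-add shape used by both ports) ----------
theorem pvFoldAdd_getD {κ β : Type} [BEq κ] [LawfulBEq κ] [DecidableEq κ] (l : List β) (cond : β → Bool)
    (K : β → κ) (amt : β → Int) (d : PySem.Dict κ Int) (k : κ) :
    (l.foldl (fun d x => if cond x then d.insert (K x) (d.getD (K x) 0 + amt x) else d) d).getD k 0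
      = d.getD k 0 + (l.map (fun x => if cond x ∧ k = K x then amt x else 0)).sum := by
  induction l generalizing d with
  | nil => simp
  | cons x t ih =>
    simp only [List.foldl_cons, List.map_cons, List.sum_cons]
    by_cases hc : cond x
    · rw [if_pos hc, ih]
      rw [PySem.Dict.getD_insert]
      by_cases hk : k = K x
      · simp [hc, hk]; ring
      · simp [hc, hk]
    · simp [hc, ih]

theorem pvFoldAdd_keys {κ β : Type} [BEq κ] [LawfulBEq κ] (l : List β) (cond : β → Bool)
    (K : β → κ) (amt : β → Int) (d : PySem.Dict κ Int) :
    (l.foldl (fun d x => if cond x then d.insert (K x) (d.getD (K x) 0 + amt x) else d) d).keys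
      = PySem.Set.update d.keys ((l.filter cond).map K) := by
  rw [PySem.List.foldl_if_eq_foldl_filter cond
    (fun d x => d.insert (K x) (d.getD (K x) 0 + amt x)) l d]
  rw [PySem.Dict.keys_foldl_insert_key (l.filter cond) K
    (fun d x => d.getD (K x) 0 + amt x) d]

theorem pvFoldAdd_nodup {κ β : Type} [BEq κ] [LawfulBEq κ] (l : List β) (cond : β → Bool)
    (K : β → κ) (amt : β → Int) (d : PySem.Dict κ Int) (h : d.keys.Nodup) :
    (l.foldl (fun d x => if cond x then d.insert (K x) (d.getD (K x) 0 + amt x) else d) d).keys.Nodup := by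
  rw [PySem.List.foldl_if_eq_foldl_filter cond
    (fun d x => d.insert (K x) (d.getD (K x) 0 + amt x)) l d]
  exact PySem.Dict.nodup_keys_foldl_insert_key (l.filter cond) K
    (fun d x => d.getD (K x) 0 + amt x) d h

theorem pvFoldAdd_mem {κ β : Type} [BEq κ] [LawfulBEq κ] (l : List β) (cond : β → Bool)
    (K : β → κ) (amt : β → Int) (d : PySem.Dict κ Int) (k : κ) :
    (k ∈ (l.foldl (fun d x => if cond x then d.insert (K x) (d.getD (K x) 0 + amt x) else d) d).keys)
      ↔ k ∈ d.keys ∨ ∃ x ∈ l, cond x ∧ k = K x := by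
  rw [pvFoldAdd_keys l cond K amt d]
  rw [PySem.Set.mem_update]
  simp only [List.mem_map, List.mem_filter]
  constructor
  · rintro (h | ⟨x, ⟨hxl, hxc⟩, hxk⟩)
    · exact Or.inl h
    · exact Or.inr ⟨x, hxl, hxc, hxk.symm⟩
  · rintro (h | ⟨x, hxl, hxc, hxk⟩)
    · exact Or.inl h
    · exact Or.inr ⟨x, ⟨hxl, hxc⟩, hxk.symm⟩

-- ---------- A-side: the nested loops are folds over their (virtual) event lists ----------
def pvCondW (s1 s2 c1 c2 : String) : Bool :=
  (s1 == c1 || s1 == c2) && (s2 == c2 || s2 == c1) && s1 != s2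

def pvEvW (s1 s2 c1 : String) (lq : List String) : List (List Char) :=
  lq.flatMap (fun c2 => if pvCondW s1 s2 c1 c2 then [pvKeyOf (s1, s2)] else [])

def pvEvX (s1 s2 : String) : List String → List (List Char)
  | [] => []
  | c1 :: rest => (if s1 == c1 || s2 == c1 then pvEvW s1 s2 c1 rest else []) ++ pvEvX s1 s2 rest

def pvEvQ (s1 s2 : String) (later : List (List String)) : List (List Char) :=
  later.flatMap (fun lq => pvEvX s1 s2 lq)

def pvEvT (s1 : String) : List String → List (List String) → List (List Char)
  | [], _ => []
  | s2 :: r, later => pvEvQ s1 s2 later ++ pvEvT s1 r later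

def pvEvF : List String → List (List String) → List (List Char)
  | [], _ => []
  | s1 :: r, later => pvEvT s1 r later ++ pvEvF r later

def pvEvA : List (List String) → List (List Char)
  | [] => []
  | line :: later => pvEvF line later ++ pvEvA later

theorem pvLoopW_ev (s1 s2 c1 : String) (lq : List String) (d : PySem.Dict (List Char) Int) :
    pvLoopW s1 s2 c1 lq d
      = (pvEvW s1 s2 c1 lq).foldl (fun d x => d.insert x (d.getD x 0 + 1)) d := by
  induction lq generalizing d with
  | nil => rfl
  | cons c2 rest ih =>
    have he : pvEvW s1 s2 c1 (c2 :: rest)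
        = (if pvCondW s1 s2 c1 c2 then [pvKeyOf (s1, s2)] else []) ++ pvEvW s1 s2 c1 rest := by
      simp [pvEvW]
    rw [he, List.foldl_append]
    show pvLoopW s1 s2 c1 rest _ = _
    rw [ih]
    congr 1
    cases hc : pvCondW s1 s2 c1 c2
    · have hc' : ((s1 == c1 || s1 == c2) && (s2 == c2 || s2 == c1) && (s1 != s2)) = false := by
        simpa [pvCondW] using hc
      simp [hc']
    · have hc' : ((s1 == c1 || s1 == c2) && (s2 == c2 || s2 == c1) && (s1 != s2)) = true := by
        simpa [pvCondW] using hc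
      simp [hc', pvKeyOf]

theorem pvLoopX_ev (s1 s2 : String) (lq : List String) (d : PySem.Dict (List Char) Int) :
    pvLoopX s1 s2 lq d
      = (pvEvX s1 s2 lq).foldl (fun d x => d.insert x (d.getD x 0 + 1)) d := by
  induction lq generalizing d with
  | nil => rfl
  | cons c1 rest ih =>
    show pvLoopX s1 s2 rest _ = _
    rw [ih]
    have he : pvEvX s1 s2 (c1 :: rest)
        = (if s1 == c1 || s2 == c1 then pvEvW s1 s2 c1 rest else []) ++ pvEvX s1 s2 rest := rfl
    rw [he, List.foldl_append]
    congr 1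
    cases hc : (s1 == c1 || s2 == c1) <;> simp [hc, pvLoopW_ev]

theorem pvLoopQ_ev (s1 s2 : String) (later : List (List String)) (d : PySem.Dict (List Char) Int) :
    pvLoopQ s1 s2 later d
      = (pvEvQ s1 s2 later).foldl (fun d x => d.insert x (d.getD x 0 + 1)) d := by
  induction later generalizing d with
  | nil => rfl
  | cons lq more ih =>
    simp only [pvLoopQ, pvEvQ, List.flatMap_cons, List.foldl_append]
    rw [ih, pvLoopX_ev]
    simp [pvEvQ]

theorem pvLoopT_ev (s1 : String) (sfx : List String) (later : List (List String)) (d : PySem.Dict (List Char) Int) :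
    pvLoopT s1 sfx later d
      = (pvEvT s1 sfx later).foldl (fun d x => d.insert x (d.getD x 0 + 1)) d := by
  induction sfx generalizing d with
  | nil => rfl
  | cons s2 r ih =>
    simp only [pvLoopT, pvEvT, List.foldl_append]
    rw [ih, pvLoopQ_ev]

theorem pvLoopF_ev (line : List String) (later : List (List String)) (d : PySem.Dict (List Char) Int) :
    pvLoopF line later d
      = (pvEvF line later).foldl (fun d x => d.insert x (d.getD x 0 + 1)) d := by
  induction line generalizing d with
  | nil => rfl
  | cons s1 r ih =>
    simp only [pvLoopF, pvEvF, List.foldl_append]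
    rw [ih, pvLoopT_ev]

theorem pvFindWordPairs_ev (lines : List (List String)) (d : PySem.Dict (List Char) Int) :
    pvFindWordPairs lines d
      = (pvEvA lines).foldl (fun d x => d.insert x (d.getD x 0 + 1)) d := by
  induction lines generalizing d with
  | nil => rfl
  | cons line later ih =>
    simp only [pvFindWordPairs, pvEvA, List.foldl_append]
    rw [ih, pvLoopF_ev]

-- ---------- A-side: counting the events ----------
theorem pvCntW (s1 s2 c1 : String) (lq : List String) (k : List Char) :
    (pvEvW s1 s2 c1 lq).count k
      = if k = pvKeyOf (s1, s2) then lq.countP (pvCondW s1 s2 c1) else 0 := by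
  induction lq with
  | nil => simp [pvEvW]
  | cons c2 rest ih =>
    have he : pvEvW s1 s2 c1 (c2 :: rest)
        = (if pvCondW s1 s2 c1 c2 then [pvKeyOf (s1, s2)] else []) ++ pvEvW s1 s2 c1 rest := by
      simp [pvEvW]
    rw [he, List.count_append, ih, List.countP_cons]
    by_cases hk : k = pvKeyOf (s1, s2)
    · subst hk
      by_cases hc : pvCondW s1 s2 c1 c2 = true <;> simp [hc] <;> omega
    · by_cases hc : pvCondW s1 s2 c1 c2 = true
      · simp [hc, hk, List.count_singleton]
        exact fun h => hk h.symm
      · simp [hc, hk]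

theorem pvCntX (s1 s2 : String) (lq : List String) (k : List Char) :
    (pvEvX s1 s2 lq).count k
      = if k = pvKeyOf (s1, s2) ∧ s1 ≠ s2 then lq.count s1 * lq.count s2 else 0 := by
  induction lq with
  | nil => simp [pvEvX]
  | cons c1 rest ih =>
    have he : pvEvX s1 s2 (c1 :: rest)
        = (if s1 == c1 || s2 == c1 then pvEvW s1 s2 c1 rest else []) ++ pvEvX s1 s2 rest := rfl
    rw [he, List.count_append, ih]
    by_cases hk : k = pvKeyOf (s1, s2)
    case neg =>
      by_cases hg : (s1 == c1 || s2 == c1) = true <;> simp [hg, pvCntW, hk]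
    case pos =>
      subst hk
      by_cases hs : s1 = s2
      · subst hs
        have h0 : ∀ r : List String, List.countP (pvCondW s1 s1 c1) r = 0 := fun r =>
          List.countP_eq_zero.mpr (fun c2 _ => by simp [pvCondW])
        have hguard : List.count (pvKeyOf (s1, s1))
            (if s1 == c1 || s1 == c1 then pvEvW s1 s1 c1 rest else []) = 0 := by
          by_cases hg : (s1 == c1 || s1 == c1) = true
          · rw [if_pos hg, pvCntW]; simp [h0]
          · rw [if_neg hg]; simp
        rw [hguard]
        simp
      · have hif : ∀ n : Nat, (if pvKeyOf (s1, s2) = pvKeyOf (s1, s2) ∧ s1 ≠ s2 then n else 0) = n :=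
          fun n => if_pos ⟨rfl, hs⟩
        by_cases h1 : c1 = s1
        · subst h1
          have hcp : List.countP (pvCondW c1 s2 c1) rest = rest.count s2 := by
            rw [List.count_eq_countP]
            refine List.countP_congr (fun x _ => ?_)
            by_cases hx : x = s2
            · subst hx
              simp [pvCondW, hs, Ne.symm hs]
            · have h2 : (s2 == x) = false := by
                simp only [beq_eq_false_iff_ne, ne_eq]
                exact fun h => hx h.symm
              have h3 : (s2 == c1) = false := by
                simp only [beq_eq_false_iff_ne, ne_eq]
                exact fun h => hs h.symm
              simp [pvCondW, h2, h3, hx]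
          have hguard : List.count (pvKeyOf (c1, s2))
              (if c1 == c1 || s2 == c1 then pvEvW c1 s2 c1 rest else []) = rest.count s2 := by
            rw [if_pos (by simp : (c1 == c1 || s2 == c1) = true), pvCntW, if_pos rfl, hcp]
          rw [hguard, List.count_cons_self,
            List.count_cons_of_ne hs, hif, hif]
          ring
        · by_cases h2 : c1 = s2
          · subst h2
            have hcp : List.countP (pvCondW s1 c1 c1) rest = rest.count s1 := by
              rw [List.count_eq_countP]
              refine List.countP_congr (fun x _ => ?_)
              by_cases hx : x = s1
              · subst hx
                simp [pvCondW, hs, Ne.symm hs, h1, Ne.symm h1]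
              · have h3 : (s1 == x) = false := by
                  simp only [beq_eq_false_iff_ne, ne_eq]
                  exact fun h => hx h.symm
                have h4 : (s1 == c1) = false := by
                  simp only [beq_eq_false_iff_ne, ne_eq]
                  exact hs
                simp [pvCondW, h3, h4, hx]
            have hguard : List.count (pvKeyOf (s1, c1))
                (if s1 == c1 || c1 == c1 then pvEvW s1 c1 c1 rest else []) = rest.count s1 := by
              rw [if_pos (by simp : (s1 == c1 || c1 == c1) = true), pvCntW, if_pos rfl, hcp]
            rw [hguard, List.count_cons_self,
              List.count_cons_of_ne h1, hif, hif]
            ring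
          · have hg : ¬((s1 == c1 || s2 == c1) = true) := by
              simp only [Bool.or_eq_true, beq_iff_eq]
              rintro (h | h)
              · exact h1 h.symm
              · exact h2 h.symm
            have hguard : List.count (pvKeyOf (s1, s2))
                (if s1 == c1 || s2 == c1 then pvEvW s1 s2 c1 rest else []) = 0 := by
              rw [if_neg hg]; simp
            rw [hguard, List.count_cons_of_ne h1, List.count_cons_of_ne h2, hif]
            simp

theorem pvCntQ (s1 s2 : String) (later : List (List String)) (k : List Char) :
    (pvEvQ s1 s2 later).count k
      = if k = pvKeyOf (s1, s2) ∧ s1 ≠ s2 then pvMv later (s1, s2) else 0 := by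
  induction later with
  | nil => simp [pvEvQ, pvMv]
  | cons lq more ih =>
    have he : pvEvQ s1 s2 (lq :: more) = pvEvX s1 s2 lq ++ pvEvQ s1 s2 more := by simp [pvEvQ]
    rw [he, List.count_append, ih, pvCntX]
    by_cases h : k = pvKeyOf (s1, s2) ∧ s1 ≠ s2 <;> simp [h, pvMv]

theorem pvCntT (s1 : String) (sfx : List String) (later : List (List String)) (k : List Char) :
    (pvEvT s1 sfx later).count k
      = ((sfx.map (fun s2 => if k = pvKeyOf (s1, s2) ∧ s1 ≠ s2 then pvMv later (s1, s2) else 0)).sum) := by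
  induction sfx with
  | nil => simp [pvEvT]
  | cons s2 r ih =>
    simp only [pvEvT, List.count_append, ih, pvCntQ, List.map_cons, List.sum_cons]

theorem pvCntF (line : List String) (later : List (List String)) (k : List Char) :
    (pvEvF line later).count k
      = ((pvPairsOf line).map (fun pr => if k = pvKeyOf pr ∧ pr.1 ≠ pr.2 then pvMv later pr else 0)).sum := by
  induction line with
  | nil => simp [pvEvF, pvPairsOf]
  | cons s1 r ih =>
    simp only [pvEvF, List.count_append, ih, pvCntT, pvPairsOf, List.map_append,
      List.sum_append, List.map_map]
    simp [Function.comp_def]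

theorem pvCntA (lines : List (List String)) (k : List Char) :
    (pvEvA lines).count k = pvNN lines k := by
  induction lines with
  | nil => simp [pvEvA, pvNN]
  | cons line later ih =>
    simp only [pvEvA, List.count_append, ih, pvCntF, pvNN]
    congr 1
    rw [show pvPairsNe line = (pvPairsOf line).filter (fun pr => pr.1 != pr.2) from rfl, pvSumIf]
    refine congrArg List.sum (List.map_congr_left fun pr _ => ?_)
    by_cases h1 : pr.1 = pr.2 <;> by_cases h2 : k = pvKeyOf pr <;> simp [h1, h2]

-- A's dict, characterised
theorem pvA_getD (lines : List (List String)) (k : List Char) :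
    (pvFindWordPairs lines PySem.Dict.empty).getD k 0 = (pvNN lines k : Int) := by
  rw [pvFindWordPairs_ev, PySem.Dict.getD_foldl_insert_add_one, pvCntA]
  simp

theorem pvA_nodup (lines : List (List String)) :
    (pvFindWordPairs lines PySem.Dict.empty).keys.Nodup := by
  rw [pvFindWordPairs_ev]
  exact PySem.Dict.nodup_keys_foldl_insert _ _ _ (by
    show (List.Nodup ([] : List (List Char)))
    simp)

theorem pvA_mem (lines : List (List String)) (k : List Char) :
    k ∈ (pvFindWordPairs lines PySem.Dict.empty).keys ↔ 0 < pvNN lines k := by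
  rw [pvFindWordPairs_ev, PySem.Dict.keys_foldl_insert, ← pvCntA]
  rw [show (PySem.Dict.empty : PySem.Dict (List Char) Int).keys = [] from rfl]
  rw [PySem.Set.update_nil_left, PySem.Set.mem_ofList]
  exact List.count_pos_iff.symm

-- ---------- B-side: pairsOf bookkeeping ----------
theorem pvCountMapPair (h : String) (l : List String) (pr : String × String) :
    (l.map (fun x => (h, x))).count pr = if pr.1 = h then l.count pr.2 else 0 := by
  obtain ⟨p1, p2⟩ := pr
  induction l with
  | nil => simp
  | cons x t ih =>
    simp only [List.map_cons, List.count_cons, ih]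
    by_cases h1 : p1 = h
    · by_cases h2 : x = p2 <;> simp [h1, h2]
    · simp [h1]
      exact fun hh => absurd hh.symm h1

theorem pvPairsOf_append (xs : List String) (w : String) (pr : String × String) :
    (pvPairsOf (xs ++ [w])).count pr
      = (pvPairsOf xs).count pr + (if pr.2 = w then xs.count pr.1 else 0) := by
  induction xs with
  | nil => simp [pvPairsOf]
  | cons x tl ih =>
    simp only [List.cons_append, pvPairsOf, List.count_append, ih, pvCountMapPair,
      List.count_cons]
    by_cases h1 : pr.1 = x
    · by_cases h2 : pr.2 = w
      · simp [h1, h2, List.count_append, List.count_singleton]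
        omega
      · simp [h1, h2, Ne.symm h2, List.count_append, List.count_singleton]
    · by_cases h2 : pr.2 = w
      · simp [h1, Ne.symm h1, h2, List.count_append, List.count_singleton]
      · simp [h1, Ne.symm h1, h2, Ne.symm h2, List.count_append, List.count_singleton]

theorem pvPairsNe_append (xs : List String) (w : String) (pr : String × String) :
    (pvPairsNe (xs ++ [w])).count pr
      = (pvPairsNe xs).count pr + (if pr.2 = w ∧ pr.1 ≠ w then xs.count pr.1 else 0) := by
  by_cases hne : pr.1 = pr.2
  · have h0 : ∀ ys : List String, (pvPairsNe ys).count pr = 0 := by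
      intro ys
      refine List.count_eq_zero.mpr (fun hmem => ?_)
      rcases List.mem_filter.mp hmem with ⟨-, hb⟩
      simp [hne] at hb
    rw [h0, h0]
    by_cases h2 : pr.2 = w
    · have : ¬pr.1 ≠ w := by simp [hne, h2]
      simp [this]
    · simp [h2]
  · have hb : (pr.1 != pr.2) = true := by simpa using hne
    rw [show pvPairsNe (xs ++ [w]) = (pvPairsOf (xs ++ [w])).filter (fun pr => pr.1 != pr.2) from rfl,
      List.count_filter (p := fun q : String × String => q.1 != q.2) (a := pr) hb,
      show pvPairsNe xs = (pvPairsOf xs).filter (fun pr => pr.1 != pr.2) from rfl,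
      List.count_filter (p := fun q : String × String => q.1 != q.2) (a := pr) hb, pvPairsOf_append]
    by_cases h2 : pr.2 = w
    · have h1 : pr.1 ≠ w := fun h => hne (h.trans h2.symm)
      simp [h2, h1]
    · simp [h2]

theorem pvPairsNe_ne {l : List String} {pr : String × String} (h : pr ∈ pvPairsNe l) :
    pr.1 ≠ pr.2 := by
  rcases List.mem_filter.mp h with ⟨-, hb⟩
  simpa using hb

-- ---------- B-side: pvBuildPC invariant ----------
theorem pvSumCast {α : Type} (l : List α) (f : α → Nat) :
    (l.map (fun x => (f x : Int))).sum = ((l.map f).sum : Int) := by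
  induction l with
  | nil => simp
  | cons x t ih => simp [ih]

theorem pvPStep_getD (w : String) (C : PySem.Dict String Int) (P : PySem.Dict (String × String) Int)
    (hC2 : C.keys.Nodup) (pr : String × String) :
    (C.items.foldl (fun P kv =>
        if kv.1 != w then P.insert (kv.1, w) (P.getD (kv.1, w) 0 + kv.2) else P) P).getD pr 0
      = P.getD pr 0 + (if pr.2 = w ∧ pr.1 ≠ w ∧ pr.1 ∈ C.keys then C.getD pr.1 0 else 0) := by
  rw [pvFoldAdd_getD C.items (fun kv => kv.1 != w) (fun kv => (kv.1, w)) (fun kv => kv.2) P pr]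
  congr 1
  rw [PySem.Dict.items_eq_map_keys C hC2 0, List.map_map]
  have hcong : ∀ x ∈ C.keys,
      ((fun kv : String × Int => if (kv.1 != w) = true ∧ pr = (kv.1, w) then kv.2 else 0)
        ∘ (fun k => (k, C.getD k 0))) x
      = (if x = pr.1 then (if pr.2 = w ∧ pr.1 ≠ w then C.getD x 0 else 0) else 0) := by
    intro x _
    simp only [Function.comp_apply, bne_iff_ne, ne_eq, Prod.ext_iff]
    by_cases h1 : x = pr.1
    · by_cases h2 : pr.2 = w <;> by_cases h3 : pr.1 = w <;>
        simp [h1, h2, h3] <;> tauto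
    · by_cases hx : ¬x = w ∧ pr.1 = x ∧ pr.2 = w
      · exact absurd hx.2.1.symm h1
      · simp [h1]
        intro hxw hpx
        exact absurd hpx.symm h1
  rw [List.map_congr_left hcong, pvSumIndicator C.keys pr.1 _ hC2]
  by_cases hm : pr.1 ∈ C.keys <;> by_cases h2 : pr.2 = w ∧ pr.1 ≠ w <;> simp [hm, h2] <;> tauto

theorem pvBuildPC_aux (ws : List String) : ∀ (pre : List String)
    (P : PySem.Dict (String × String) Int) (C : PySem.Dict String Int),
    (∀ x, C.getD x 0 = (pre.count x : Int)) → C.keys.Nodup → (∀ x, x ∈ C.keys ↔ x ∈ pre) →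
    (∀ pr, P.getD pr 0 = ((pvPairsNe pre).count pr : Int)) → P.keys.Nodup →
    (∀ pr, pr ∈ P.keys ↔ pr ∈ pvPairsNe pre) →
    ((∀ x, (ws.foldl (fun PC w => (PC.2.items.foldl (fun P kv =>
          if kv.1 != w then P.insert (kv.1, w) (P.getD (kv.1, w) 0 + kv.2) else P) PC.1,
        PC.2.insert w (PC.2.getD w 0 + 1))) (P, C)).2.getD x 0 = ((pre ++ ws).count x : Int))
      ∧ (ws.foldl (fun PC w => (PC.2.items.foldl (fun P kv =>
          if kv.1 != w then P.insert (kv.1, w) (P.getD (kv.1, w) 0 + kv.2) else P) PC.1,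
        PC.2.insert w (PC.2.getD w 0 + 1))) (P, C)).2.keys.Nodup
      ∧ (∀ x, x ∈ (ws.foldl (fun PC w => (PC.2.items.foldl (fun P kv =>
          if kv.1 != w then P.insert (kv.1, w) (P.getD (kv.1, w) 0 + kv.2) else P) PC.1,
        PC.2.insert w (PC.2.getD w 0 + 1))) (P, C)).2.keys ↔ x ∈ pre ++ ws)
      ∧ (∀ pr, (ws.foldl (fun PC w => (PC.2.items.foldl (fun P kv =>
          if kv.1 != w then P.insert (kv.1, w) (P.getD (kv.1, w) 0 + kv.2) else P) PC.1,
        PC.2.insert w (PC.2.getD w 0 + 1))) (P, C)).1.getD pr 0 = ((pvPairsNe (pre ++ ws)).count pr : Int))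
      ∧ (ws.foldl (fun PC w => (PC.2.items.foldl (fun P kv =>
          if kv.1 != w then P.insert (kv.1, w) (P.getD (kv.1, w) 0 + kv.2) else P) PC.1,
        PC.2.insert w (PC.2.getD w 0 + 1))) (P, C)).1.keys.Nodup
      ∧ (∀ pr, pr ∈ (ws.foldl (fun PC w => (PC.2.items.foldl (fun P kv =>
          if kv.1 != w then P.insert (kv.1, w) (P.getD (kv.1, w) 0 + kv.2) else P) PC.1,
        PC.2.insert w (PC.2.getD w 0 + 1))) (P, C)).1.keys ↔ pr ∈ pvPairsNe (pre ++ ws))) := by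
  induction ws with
  | nil =>
    intro pre P C hC1 hC2 hC3 hP1 hP2 hP3
    simp only [List.foldl_nil, List.append_nil]
    exact ⟨hC1, hC2, hC3, hP1, hP2, hP3⟩
  | cons w rest ih =>
    intro pre P C hC1 hC2 hC3 hP1 hP2 hP3
    simp only [List.foldl_cons]
    have hl : pre ++ w :: rest = (pre ++ [w]) ++ rest := by simp
    rw [hl]
    refine ih (pre ++ [w]) _ _ ?_ ?_ ?_ ?_ ?_ ?_
    · intro x
      rw [PySem.Dict.getD_insert]
      by_cases hx : x = w
      · subst hx
        rw [if_pos rfl, hC1]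
        simp [List.count_append, List.count_singleton]
      · rw [if_neg hx]
        have hcw : (w == x) = false := by
          simp only [beq_eq_false_iff_ne, ne_eq]
          exact fun h => hx h.symm
        simp [List.count_append, List.count_singleton, hcw, hC1]
    · exact PySem.Dict.nodup_keys_insert C w _ hC2
    · intro x
      rw [PySem.Dict.mem_keys_insert]
      simp [hC3 x, List.mem_append, or_comm]
    · intro pr
      rw [pvPStep_getD w C P hC2 pr, hP1 pr, pvPairsNe_append]
      push_cast
      congr 1
      by_cases h2 : pr.2 = w ∧ pr.1 ≠ w
      · by_cases hm : pr.1 ∈ C.keys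
        · rw [if_pos ⟨h2.1, h2.2, hm⟩, if_pos h2, hC1]
        · rw [if_neg (fun h => hm h.2.2), if_pos h2]
          have : pr.1 ∉ pre := fun h => hm ((hC3 pr.1).mpr h)
          rw [List.count_eq_zero.mpr this]
          simp
      · rw [if_neg (fun h => h2 ⟨h.1, h.2.1⟩), if_neg h2]
    · exact pvFoldAdd_nodup C.items (fun kv => kv.1 != w) (fun kv => (kv.1, w)) (fun kv => kv.2) P hP2
    · intro pr
      rw [pvFoldAdd_mem C.items (fun kv => kv.1 != w) (fun kv => (kv.1, w)) (fun kv => kv.2) P pr]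
      have hex : (∃ kv ∈ C.items, (kv.1 != w) = true ∧ pr = (kv.1, w))
          ↔ (pr.2 = w ∧ pr.1 ≠ w ∧ pr.1 ∈ pre) := by
        rw [PySem.Dict.items_eq_map_keys C hC2 0]
        constructor
        · rintro ⟨kv, hkv, hcond, hpr⟩
          rcases List.mem_map.mp hkv with ⟨x, hx, rfl⟩
          subst hpr
          refine ⟨rfl, by simpa using hcond, (hC3 x).mp hx⟩
        · rintro ⟨h2, h1, hmem⟩
          refine ⟨(pr.1, C.getD pr.1 0), List.mem_map.mpr ⟨pr.1, (hC3 pr.1).mpr hmem, rfl⟩,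
            by simpa using h1, ?_⟩
          rw [← h2]
      rw [hex]
      have hcnt := pvPairsNe_append pre w pr
      constructor
      · rintro (h | ⟨h2, h1, hmem⟩)
        · have := List.count_pos_iff.mpr ((hP3 pr).mp h)
          refine List.count_pos_iff.mp ?_
          omega
        · have hc : 0 < pre.count pr.1 := List.count_pos_iff.mpr hmem
          refine List.count_pos_iff.mp ?_
          rw [hcnt, if_pos ⟨h2, h1⟩]
          omega
      · intro h
        have hc := List.count_pos_iff.mpr h
        rw [hcnt] at hc
        by_cases h2 : pr.2 = w ∧ pr.1 ≠ w
        · rw [if_pos h2] at hc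
          by_cases hold : 0 < (pvPairsNe pre).count pr
          · exact Or.inl ((hP3 pr).mpr (List.count_pos_iff.mp hold))
          · refine Or.inr ⟨h2.1, h2.2, List.count_pos_iff.mp ?_⟩
            omega
        · rw [if_neg h2] at hc
          simp only [Nat.add_zero] at hc
          exact Or.inl ((hP3 pr).mpr (List.count_pos_iff.mp hc))

theorem pvBuildPC_inv (words : List String) :
    (∀ x, (pvBuildPC words).2.getD x 0 = (words.count x : Int))
    ∧ (pvBuildPC words).2.keys.Nodup
    ∧ (∀ x, x ∈ (pvBuildPC words).2.keys ↔ x ∈ words)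
    ∧ (∀ pr, (pvBuildPC words).1.getD pr 0 = ((pvPairsNe words).count pr : Int))
    ∧ (pvBuildPC words).1.keys.Nodup
    ∧ (∀ pr, pr ∈ (pvBuildPC words).1.keys ↔ pr ∈ pvPairsNe words) := by
  have h := pvBuildPC_aux words [] PySem.Dict.empty PySem.Dict.empty
    (by intro x; simp) (by simp [PySem.Dict.keys_empty]) (by intro x; simp [PySem.Dict.keys_empty])
    (by intro pr; simp [pvPairsNe, pvPairsOf]) (by simp [PySem.Dict.keys_empty])
    (by intro pr; simp [PySem.Dict.keys_empty, pvPairsNe, pvPairsOf])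
  simpa [pvBuildPC] using h

-- ---------- B-side: the suffix loop invariant ----------
theorem pvPSInner (a : String) (ks : List String) (hnd : ks.Nodup) (C : PySem.Dict String Int)
    (PS : PySem.Dict (String × String) Int) (x y : String) :
    (ks.foldl (fun PS b => if a != b then
        PS.insert (a, b) (PS.getD (a, b) 0 + C.getD a 0 * C.getD b 0) else PS) PS).getD (x, y) 0
      = PS.getD (x, y) 0 + (if a = x ∧ y ∈ ks ∧ x ≠ y then C.getD x 0 * C.getD y 0 else 0) := by
  rw [pvFoldAdd_getD ks (fun b => a != b) (fun b => (a, b))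
    (fun b => C.getD a 0 * C.getD b 0) PS (x, y)]
  congr 1
  have hcong : ∀ b ∈ ks,
      (if (a != b) = true ∧ (x, y) = (a, b) then C.getD a 0 * C.getD b 0 else 0)
      = (if b = y then (if a = x ∧ x ≠ y then C.getD x 0 * C.getD y 0 else 0) else 0) := by
    intro b _
    simp only [bne_iff_ne, ne_eq, Prod.ext_iff]
    by_cases hb : b = y
    · subst hb
      by_cases hax : a = x
      · subst hax
        by_cases hxy : a = b <;> simp [hxy] <;> tauto
      · rw [if_neg (fun h : ¬a = b ∧ x = a ∧ b = b => hax h.2.1.symm),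
          if_neg (fun h : a = x ∧ x ≠ b => hax h.1)]
        simp
    · rw [if_neg (fun h : ¬a = b ∧ x = a ∧ y = b => hb h.2.2.symm), if_neg hb]
  rw [List.map_congr_left hcong, pvSumIndicator ks y _ hnd]
  by_cases h1 : y ∈ ks <;> by_cases h2 : a = x ∧ x ≠ y <;> simp [h1, h2] <;> tauto

theorem pvPSOuter (ks : List String) (hnd : ks.Nodup) (C : PySem.Dict String Int) :
    ∀ (l : List String), l.Nodup →
    ∀ (PS : PySem.Dict (String × String) Int) (x y : String),
    (l.foldl (fun PS a => ks.foldl (fun PS b => if a != b then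
        PS.insert (a, b) (PS.getD (a, b) 0 + C.getD a 0 * C.getD b 0) else PS) PS) PS).getD (x, y) 0
      = PS.getD (x, y) 0 + (if x ∈ l ∧ y ∈ ks ∧ x ≠ y then C.getD x 0 * C.getD y 0 else 0) := by
  intro l
  induction l with
  | nil => intro _ PS x y; simp
  | cons a t ih =>
    intro hndl PS x y
    rcases List.nodup_cons.mp hndl with ⟨ha, ht⟩
    simp only [List.foldl_cons]
    rw [ih ht, pvPSInner a ks hnd C PS x y]
    by_cases hy : y ∈ ks ∧ x ≠ y
    case neg =>
      have nA : ¬(a = x ∧ y ∈ ks ∧ x ≠ y) := fun h => hy ⟨h.2.1, h.2.2⟩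
      have nB : ¬(x ∈ t ∧ y ∈ ks ∧ x ≠ y) := fun h => hy ⟨h.2.1, h.2.2⟩
      have nC : ¬(x ∈ a :: t ∧ y ∈ ks ∧ x ≠ y) := fun h => hy ⟨h.2.1, h.2.2⟩
      rw [if_neg nA, if_neg nB, if_neg nC]
      ring
    case pos =>
      by_cases hxa : a = x
      · have hxt : x ∉ t := fun h => ha (hxa ▸ h)
        rw [if_pos ⟨hxa, hy.1, hy.2⟩, if_neg (fun h => hxt h.1),
          if_pos ⟨List.mem_cons.mpr (Or.inl hxa.symm), hy.1, hy.2⟩]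
        ring
      · by_cases hxt : x ∈ t
        · rw [if_neg (fun h => hxa h.1), if_pos ⟨hxt, hy.1, hy.2⟩,
            if_pos ⟨List.mem_cons_of_mem a hxt, hy.1, hy.2⟩]
          ring
        · rw [if_neg (fun h => hxa h.1), if_neg (fun h => hxt h.1),
            if_neg (fun h => (List.mem_cons.mp h.1).elim (fun e => hxa e.symm) hxt)]
          ring

theorem pvNNlinePos (line : List String) (later : List (List String)) (k : List Char) :
    0 < ((pvPairsNe line).map (fun pr => if k = pvKeyOf pr then pvMv later pr else 0)).sum
      ↔ ∃ pr ∈ pvPairsNe line, k = pvKeyOf pr ∧ 0 < pvMv later pr := by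
  rw [Nat.pos_iff_ne_zero, Ne, List.sum_eq_zero_iff]
  push_neg
  constructor
  · rintro ⟨v, hv, hv0⟩
    rcases List.mem_map.mp hv with ⟨pr, hpr, rfl⟩
    by_cases hk : k = pvKeyOf pr
    · exact ⟨pr, hpr, hk, by simpa [hk, Nat.pos_iff_ne_zero] using hv0⟩
    · simp [hk] at hv0
  · rintro ⟨pr, hpr, hk, hm⟩
    exact ⟨_, List.mem_map.mpr ⟨pr, hpr, rfl⟩, by simp [hk]; omega⟩

theorem pvSuffStep_inv (line : List String) (later : List (List String))
    (st : PySem.Dict (String × String) Int × PySem.Dict (List Char) Int)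
    (h1 : ∀ pr : String × String, pr.1 ≠ pr.2 → st.1.getD pr 0 = (pvMv later pr : Int))
    (h2 : ∀ k, st.2.getD k 0 = (pvNN later k : Int))
    (h3 : st.2.keys.Nodup)
    (h4 : ∀ k, k ∈ st.2.keys ↔ 0 < pvNN later k) :
    (∀ pr : String × String, pr.1 ≠ pr.2 →
        (pvSuffStep st (pvBuildPC line)).1.getD pr 0 = (pvMv (line :: later) pr : Int))
    ∧ (∀ k, (pvSuffStep st (pvBuildPC line)).2.getD k 0 = (pvNN (line :: later) k : Int))
    ∧ (pvSuffStep st (pvBuildPC line)).2.keys.Nodup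
    ∧ (∀ k, k ∈ (pvSuffStep st (pvBuildPC line)).2.keys ↔ 0 < pvNN (line :: later) k) := by
  obtain ⟨hC1, hC2, hC3, hP1, hP2, hP3⟩ := pvBuildPC_inv line
  have hTgetD : ∀ k, ((pvBuildPC line).1.items.foldl (fun T kv =>
      if st.1.getD kv.1 0 != 0 then
        T.insert (kv.1.1.toList ++ ' ' :: kv.1.2.toList)
          (T.getD (kv.1.1.toList ++ ' ' :: kv.1.2.toList) 0 + kv.2 * st.1.getD kv.1 0)
      else T) st.2).getD k 0 = (pvNN (line :: later) k : Int) := by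
    intro k
    rw [pvFoldAdd_getD (pvBuildPC line).1.items (fun kv => st.1.getD kv.1 0 != 0)
      (fun kv => kv.1.1.toList ++ ' ' :: kv.1.2.toList) (fun kv => kv.2 * st.1.getD kv.1 0) st.2 k]
    rw [PySem.Dict.items_eq_map_keys _ hP2 0, List.map_map]
    have hcong : ∀ pk ∈ (pvBuildPC line).1.keys,
        ((fun kv : (String × String) × Int =>
            if (st.1.getD kv.1 0 != 0) = true ∧ k = kv.1.1.toList ++ ' ' :: kv.1.2.toList
            then kv.2 * st.1.getD kv.1 0 else 0)
          ∘ (fun pk => (pk, (pvBuildPC line).1.getD pk 0))) pk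
        = ((pvPairsNe line).count pk : Int)
            * (if k = pvKeyOf pk then (pvMv later pk : Int) else 0) := by
      intro pk hpk
      have hmem : pk ∈ pvPairsNe line := (hP3 pk).mp hpk
      have hne : pk.1 ≠ pk.2 := pvPairsNe_ne hmem
      simp only [Function.comp_apply, h1 pk hne, hP1 pk]
      by_cases hm : pvMv later pk = 0
      · simp [hm, pvKeyOf]
      · have hm' : ((pvMv later pk : Int) != 0) = true := by
          simp [hm]
        by_cases hk : k = pvKeyOf pk
        · rw [if_pos ⟨hm', by simpa [pvKeyOf] using hk⟩, if_pos hk]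
        · rw [if_neg (fun h => hk (by simpa [pvKeyOf] using h.2)), if_neg hk]
          simp
    rw [List.map_congr_left hcong,
      pvSumCountWeight (pvBuildPC line).1.keys (pvPairsNe line)
        (fun pr => if k = pvKeyOf pr then (pvMv later pr : Int) else 0) hP2 hP3, h2 k]
    have hcast : ((pvPairsNe line).map
        (fun pr => if k = pvKeyOf pr then (pvMv later pr : Int) else 0)).sum
        = (((pvPairsNe line).map (fun pr => if k = pvKeyOf pr then pvMv later pr else 0)).sum : Int) := by
      rw [← pvSumCast]
      refine congrArg List.sum (List.map_congr_left fun pr _ => ?_)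
      by_cases hk : k = pvKeyOf pr <;> simp [hk]
    rw [hcast]
    simp [pvNN]
    push_cast
    ring
  have hTmem : ∀ k, (k ∈ ((pvBuildPC line).1.items.foldl (fun T kv =>
      if st.1.getD kv.1 0 != 0 then
        T.insert (kv.1.1.toList ++ ' ' :: kv.1.2.toList)
          (T.getD (kv.1.1.toList ++ ' ' :: kv.1.2.toList) 0 + kv.2 * st.1.getD kv.1 0)
      else T) st.2).keys) ↔ 0 < pvNN (line :: later) k := by
    intro k
    rw [pvFoldAdd_mem (pvBuildPC line).1.items (fun kv => st.1.getD kv.1 0 != 0)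
      (fun kv => kv.1.1.toList ++ ' ' :: kv.1.2.toList) (fun kv => kv.2 * st.1.getD kv.1 0) st.2 k]
    have hex : (∃ kv ∈ (pvBuildPC line).1.items,
        (st.1.getD kv.1 0 != 0) = true ∧ k = kv.1.1.toList ++ ' ' :: kv.1.2.toList)
        ↔ ∃ pr ∈ pvPairsNe line, k = pvKeyOf pr ∧ 0 < pvMv later pr := by
      rw [PySem.Dict.items_eq_map_keys _ hP2 0]
      constructor
      · rintro ⟨kv, hkv, hcond, hpr⟩
        rcases List.mem_map.mp hkv with ⟨pk, hpk, rfl⟩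
        have hmem : pk ∈ pvPairsNe line := (hP3 pk).mp hpk
        have hne : pk.1 ≠ pk.2 := pvPairsNe_ne hmem
        rw [h1 pk hne] at hcond
        refine ⟨pk, hmem, by simpa [pvKeyOf] using hpr, ?_⟩
        have : (pvMv later pk : Int) ≠ 0 := by simpa using hcond
        omega
      · rintro ⟨pr, hpr, hk, hm⟩
        refine ⟨(pr, (pvBuildPC line).1.getD pr 0),
          List.mem_map.mpr ⟨pr, (hP3 pr).mpr hpr, rfl⟩, ?_, by simpa [pvKeyOf] using hk⟩
        have hne : pr.1 ≠ pr.2 := pvPairsNe_ne hpr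
        rw [h1 pr hne]
        simpa using (by omega : (pvMv later pr : Int) ≠ 0)
    rw [hex, h4 k]
    have hpos := pvNNlinePos line later k
    simp only [pvNN]
    constructor
    · rintro (h | h)
      · omega
      · have := hpos.mpr (by
          rcases h with ⟨pr, hpr, hk, hm⟩
          exact ⟨pr, hpr, hk, hm⟩)
        omega
    · intro h
      by_cases hl : 0 < ((pvPairsNe line).map
          (fun pr => if k = pvKeyOf pr then pvMv later pr else 0)).sum
      · exact Or.inr (hpos.mp hl)
      · exact Or.inl (by omega)
  refine ⟨?_, ?_, ?_, ?_⟩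
  · intro pr hne
    obtain ⟨x, y⟩ := pr
    show ((pvBuildPC line).2.keys.foldl _ st.1).getD (x, y) 0 = _
    rw [pvPSOuter (pvBuildPC line).2.keys hC2 (pvBuildPC line).2 (pvBuildPC line).2.keys hC2 st.1 x y]
    rw [h1 (x, y) hne]
    have hun : (if x ∈ (pvBuildPC line).2.keys ∧ y ∈ (pvBuildPC line).2.keys ∧ x ≠ y
        then (pvBuildPC line).2.getD x 0 * (pvBuildPC line).2.getD y 0 else 0)
        = ((line.count x : Int) * (line.count y : Int)) := by
      by_cases hx : x ∈ (pvBuildPC line).2.keys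
      · by_cases hy : y ∈ (pvBuildPC line).2.keys
        · rw [if_pos ⟨hx, hy, hne⟩, hC1, hC1]
        · rw [if_neg (fun h => hy h.2.1)]
          have : y ∉ line := fun h => hy ((hC3 y).mpr h)
          rw [List.count_eq_zero.mpr this]
          simp
      · rw [if_neg (fun h => hx h.1)]
        have : x ∉ line := fun h => hx ((hC3 x).mpr h)
        rw [List.count_eq_zero.mpr this]
        simp
    rw [hun]
    simp [pvMv]
    push_cast
    ring
  · intro k
    show (((pvBuildPC line).1.items.foldl _ st.2).getD k 0) = _
    exact hTgetD k
  · show (((pvBuildPC line).1.items.foldl _ st.2).keys.Nodup)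
    exact pvFoldAdd_nodup _ _ _ _ _ h3
  · intro k
    show (k ∈ ((pvBuildPC line).1.items.foldl _ st.2).keys) ↔ _
    exact hTmem k

theorem pvSuffLoop_inv (lines : List (List String)) :
    (∀ pr : String × String, pr.1 ≠ pr.2 →
        ((lines.map pvBuildPC).reverse.foldl pvSuffStep (PySem.Dict.empty, PySem.Dict.empty)).1.getD pr 0
          = (pvMv lines pr : Int))
    ∧ (∀ k, ((lines.map pvBuildPC).reverse.foldl pvSuffStep (PySem.Dict.empty, PySem.Dict.empty)).2.getD k 0
          = (pvNN lines k : Int))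
    ∧ ((lines.map pvBuildPC).reverse.foldl pvSuffStep (PySem.Dict.empty, PySem.Dict.empty)).2.keys.Nodup
    ∧ (∀ k, k ∈ ((lines.map pvBuildPC).reverse.foldl pvSuffStep (PySem.Dict.empty, PySem.Dict.empty)).2.keys
          ↔ 0 < pvNN lines k) := by
  induction lines with
  | nil =>
    refine ⟨?_, ?_, ?_, ?_⟩ <;> simp [pvMv, pvNN]
  | cons line later ih =>
    obtain ⟨ih1, ih2, ih3, ih4⟩ := ih
    have hst : ((line :: later).map pvBuildPC).reverse.foldl pvSuffStep
          (PySem.Dict.empty, PySem.Dict.empty)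
        = pvSuffStep ((later.map pvBuildPC).reverse.foldl pvSuffStep
          (PySem.Dict.empty, PySem.Dict.empty)) (pvBuildPC line) := by
      simp [List.map_cons, List.reverse_cons, List.foldl_append]
    rw [hst]
    exact pvSuffStep_inv line later _ ih1 ih2 ih3 ih4

-- ---------- the two dicts have permutation-equal item lists ----------
theorem pvItems_perm (lines : List (List String)) :
    (pvFindWordPairs lines PySem.Dict.empty).items.Perm
      ((lines.map pvBuildPC).reverse.foldl pvSuffStep (PySem.Dict.empty, PySem.Dict.empty)).2.items := by
  obtain ⟨-, hB2, hB3, hB4⟩ := pvSuffLoop_inv lines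
  have hA2 := pvA_nodup lines
  have hkeys : (pvFindWordPairs lines PySem.Dict.empty).keys.Perm
      ((lines.map pvBuildPC).reverse.foldl pvSuffStep (PySem.Dict.empty, PySem.Dict.empty)).2.keys :=
    (List.perm_ext_iff_of_nodup hA2 hB3).mpr (fun k => (pvA_mem lines k).trans (hB4 k).symm)
  rw [PySem.Dict.items_eq_map_keys _ hA2 0, PySem.Dict.items_eq_map_keys _ hB3 0]
  rw [List.map_congr_left (fun k _ => by rw [pvA_getD lines k] :
    ∀ k ∈ (pvFindWordPairs lines PySem.Dict.empty).keys,
      (k, (pvFindWordPairs lines PySem.Dict.empty).getD k 0) = (k, (pvNN lines k : Int)))]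
  rw [List.map_congr_left (fun k _ => by rw [hB2 k] :
    ∀ k ∈ ((lines.map pvBuildPC).reverse.foldl pvSuffStep (PySem.Dict.empty, PySem.Dict.empty)).2.keys,
      (k, ((lines.map pvBuildPC).reverse.foldl pvSuffStep
        (PySem.Dict.empty, PySem.Dict.empty)).2.getD k 0) = (k, (pvNN lines k : Int)))]
  exact hkeys.map _

-- ---------- phase 2: formatting is a filter+map of the items ----------
theorem pvProcHolder_closed (l : List (List Char × Int)) (acc : List (List String × Int)) :
    pvProcHolder l acc
      = l.foldl (fun acc kc => if (pvTokens kc.1).length = 2 then acc ++ [(pvTokens kc.1, kc.2)] else acc) acc := by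
  induction l generalizing acc with
  | nil => rfl
  | cons kc rest ih =>
    obtain ⟨k, c⟩ := kc
    simp only [pvProcHolder, List.foldl_cons]
    rw [ih]

-- ---------- sorted2 of permutation-equal lists agree ----------
theorem pvSorted2_eq_of_perm (xs ys : List (List String × Int)) (h : xs.Perm ys) :
    PySem.List.sorted2 xs Prod.fst Prod.snd = PySem.List.sorted2 ys Prod.fst Prod.snd := by
  have hs : ∀ zs : List (List String × Int),
      PySem.List.sorted2 zs Prod.fst Prod.snd
        = PySem.List.sorted zs (fun p => toLex (p.1, p.2)) := by
    intro zs
    rw [PySem.List.sorted_eq_foldl_insertBy]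
    show zs.foldl (fun acc x => PySem.List.insertBy
        (fun a b => decide (a.1 < b.1) || (!decide (b.1 < a.1) && decide (a.2 < b.2))) x acc) []
      = zs.foldl (fun acc x => PySem.List.insertBy
        (fun a b => decide ((fun p : List String × Int => toLex (p.1, p.2)) a
          < (fun p : List String × Int => toLex (p.1, p.2)) b)) x acc) []
    have hfun : (fun (a b : List String × Int) =>
        decide (a.1 < b.1) || (!decide (b.1 < a.1) && decide (a.2 < b.2)))
        = (fun (a b : List String × Int) =>
            decide ((fun p : List String × Int => toLex (p.1, p.2)) a
              < (fun p : List String × Int => toLex (p.1, p.2)) b)) := by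
      funext a b
      rcases lt_trichotomy a.1 b.1 with h | h | h
      · simp [h, Prod.Lex.toLex_lt_toLex]
      · simp [h, lt_irrefl, Prod.Lex.toLex_lt_toLex]
      · have h1 : ¬a.1 < b.1 := lt_asymm h
        have h2 : ¬a.1 = b.1 := fun e => lt_irrefl _ (e ▸ h)
        simp [h, h1, h2, Prod.Lex.toLex_lt_toLex]
    rw [hfun]
  rw [hs xs, hs ys]
  refine PySem.List.sorted_eq_sorted_of_perm xs ys _ ?_ h
  intro p q hpq
  have h1 : ((ofLex (toLex (p.1, p.2))) : List String × Int)
      = ofLex (toLex (q.1, q.2)) := congrArg (fun z => (ofLex z : List String × Int)) hpq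
  simpa using h1

theorem pvPhase2 (itemsA itemsB : List (List Char × Int)) (hperm : itemsA.Perm itemsB) :
    PySem.List.sorted2 ((itemsA.map (fun kv => (kv.1, if kv.2 = 1 then kv.2 + 1 else kv.2))).foldl
        (fun acc kc => if (pvTokens kc.1).length = 2 then acc ++ [(pvTokens kc.1, kc.2)] else acc) [])
      Prod.fst Prod.snd
    = PySem.List.sorted2 (itemsB.foldl (fun acc kv => if (pvTokens kv.1).length = 2
        then acc ++ [(pvTokens kv.1, if kv.2 = 1 then 2 else kv.2)] else acc) [])
      Prod.fst Prod.snd := by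
  apply pvSorted2_eq_of_perm
  rw [PySem.List.foldl_append_ite (fun kc : List Char × Int => (pvTokens kc.1).length = 2)
    (fun kc : List Char × Int => (pvTokens kc.1, kc.2))]
  rw [PySem.List.foldl_append_ite (fun kv : List Char × Int => (pvTokens kv.1).length = 2)
    (fun kv : List Char × Int => (pvTokens kv.1, if kv.2 = 1 then 2 else kv.2))]
  simp only [List.nil_append, List.filter_map, List.map_map]
  have hp : ((fun kc : List Char × Int => decide ((pvTokens kc.1).length = 2))
      ∘ (fun kv : List Char × Int => (kv.1, if kv.2 = 1 then kv.2 + 1 else kv.2)))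
      = (fun kv : List Char × Int => decide ((pvTokens kv.1).length = 2)) := by
    funext kv; rfl
  have hf : ((fun kc : List Char × Int => (pvTokens kc.1, kc.2))
      ∘ (fun kv : List Char × Int => (kv.1, if kv.2 = 1 then kv.2 + 1 else kv.2)))
      = (fun kv : List Char × Int => (pvTokens kv.1, if kv.2 = 1 then 2 else kv.2)) := by
    funext kv
    by_cases h : kv.2 = 1 <;> simp [Function.comp_def, h]
  rw [hp, hf]
  exact (hperm.filter _).map _

-- ---------- preprocessing agrees ----------
theorem pvIsPunc_contains (c : Char) :
    (['!', '.', '?', ',', ':'].contains c) = pvIsPunc c := by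
  have e1 : Char.ofNat 33 = '!' := by decide
  have e2 : Char.ofNat 46 = '.' := by decide
  have e3 : Char.ofNat 63 = '?' := by decide
  have e4 : Char.ofNat 44 = ',' := by decide
  have e5 : Char.ofNat 58 = ':' := by decide
  rw [pvIsPunc, e1, e2, e3, e4, e5]
  simp only [List.contains_cons, List.contains_nil, Bool.or_assoc, Bool.or_false]

theorem pvRP_shift (d : Nat) (c : Char) (cs : List Char) :
    pvRP (d + 1) (c :: cs) = c :: pvRP d cs := by
  have aux : ∀ (n d : Nat) (c : Char) (cs : List Char), cs.length - d ≤ n →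
      pvRP (d + 1) (c :: cs) = c :: pvRP d cs := by
    intro n
    induction n with
    | zero =>
      intro d c cs hn
      have hd : ¬d < cs.length := by omega
      have hL : pvRP (d + 1) (c :: cs) = c :: cs := by
        rw [pvRP, dif_neg (by simp only [List.length_cons]; omega)]
      have hR : pvRP d cs = cs := by
        rw [pvRP, dif_neg hd]
      rw [hL, hR]
    | succ m ih =>
      intro d c cs hn
      by_cases hd : d < cs.length
      · have hcond : d + 1 < (c :: cs).length := by
          simp only [List.length_cons]; omega
        have hidx : (c :: cs)[d + 1]'hcond = cs[d]'hd := by simp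
        rw [pvRP, dif_pos hcond]
        conv_rhs => rw [pvRP, dif_pos hd]
        rw [hidx]
        by_cases hp : pvIsPunc (cs[d]'hd)
        · rw [if_pos hp, if_pos hp]
          have htake : (c :: cs).take (d + 1) = c :: cs.take d := by
            simp [List.take_succ_cons]
          rw [htake]
          exact ih d c (cs.take d) (by simp only [List.length_take]; omega)
        · rw [if_neg hp, if_neg hp]
          exact ih (d + 1) c cs (by omega)
      · have hL : pvRP (d + 1) (c :: cs) = c :: cs := by
          rw [pvRP, dif_neg (by simp only [List.length_cons]; omega)]
        have hR : pvRP d cs = cs := by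
          rw [pvRP, dif_neg hd]
        rw [hL, hR]
  exact aux (cs.length - d) d c cs le_rfl

theorem pvRP_takeWhile (cs : List Char) :
    pvRP 0 cs = cs.takeWhile (fun c => !pvIsPunc c) := by
  induction cs with
  | nil => rw [pvRP]; simp
  | cons c cs ih =>
    rw [pvRP, dif_pos (by simp : 0 < (c :: cs).length)]
    by_cases hp : pvIsPunc ((c :: cs)[0]'(by simp))
    · rw [if_pos hp]
      have h0 : (c :: cs).take 0 = [] := rfl
      rw [h0, pvRP]
      have hc : pvIsPunc c = true := by simpa using hp
      simp [List.takeWhile_cons, hc]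
    · rw [if_neg hp]
      rw [pvRP_shift 0 c cs, ih]
      have hc : pvIsPunc c = false := by simpa using hp
      simp [List.takeWhile_cons, hc]

-- ===== VERDICT (by name: the statement is the Claim_ definition above) =====
theorem proc_linepairs_spec : Claim_equal_proc_linepairs := by
  intro PA FA p _
  show proc_linepairs PA FA p = proc_linepairs_alt PA FA p
  simp only [proc_linepairs, proc_linepairs_alt]
  have hword : ∀ w : String,
      String.ofList (pvRP 0 (PySem.Str.lower w).toList)
        = String.ofList ((PySem.Str.lower w).toList.takeWhile
            (fun c => !(['!', '.', '?', ',', ':'].contains c))) := by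
    intro w
    rw [pvRP_takeWhile]
    have hfn : (fun c => !pvIsPunc c)
        = (fun c : Char => !(['!', '.', '?', ',', ':'].contains c)) := by
      funext c; rw [pvIsPunc_contains]
    rw [hfn]
  have hpre : pvRemovePunct (PA.map (fun j => j.map (fun i => PySem.Str.lower i)))
      = PA.map (fun row => row.map (fun w =>
          String.ofList ((PySem.Str.lower w).toList.takeWhile
            (fun c => !(['!', '.', '?', ',', ':'].contains c))))) := by
    simp only [pvRemovePunct, List.map_map]
    refine List.map_congr_left fun row _ => ?_
    simp only [Function.comp_def, List.map_map]
    exact List.map_congr_left fun w _ => hword w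
  rw [hpre]
  set L := PA.map (fun row => row.map (fun w =>
      String.ofList ((PySem.Str.lower w).toList.takeWhile
        (fun c => !(['!', '.', '?', ',', ':'].contains c))))) with hLdef
  have hholder : (pvFindWordPairs L PySem.Dict.empty).items.foldl
      (fun h kv => h ++ [(kv.1, if (pvFindWordPairs L PySem.Dict.empty).getD kv.1 0 = 1
        then (pvFindWordPairs L PySem.Dict.empty).getD kv.1 0 + 1
        else (pvFindWordPairs L PySem.Dict.empty).getD kv.1 0)]) []
      = (pvFindWordPairs L PySem.Dict.empty).items.map
        (fun kv => (kv.1, if kv.2 = 1 then kv.2 + 1 else kv.2)) := by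
    rw [PySem.List.foldl_congr_mem _ _
      (fun h kv => h ++ [(kv.1, if kv.2 = 1 then kv.2 + 1 else kv.2)]) []
      (fun acc kv hkv => by
        rw [PySem.Dict.getD_of_mem_items _ hkv (pvA_nodup L) 0])]
    rw [PySem.List.foldl_append_singleton_eq_map]
    simp
  rw [hholder, pvProcHolder_closed]
  exact pvPhase2 _ _ (pvItems_perm L)
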